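-- pv_equiv track=rewrite | github.com/qu8n/focusbeacon | api_utils/leaderboard.py | generate_rank
-- ===== SOURCE A (Python) =====
-- def generate_rank(list_of_streaks):
--     '''
--     Takes a list of dicts containing userIDs and their streaks, and generates a ranking value for each entry based on
--     streak value. Returns the list sorted in non-descending order based on ranking.
--
--     return: [{user_id: xxx, daily_streak: xxx, rank: xxx}, {...}]
--     '''
--     sorted_list_of_streaks = sorted(list_of_streaks, key=lambda x: x['daily_streak'], reverse=True)
--
--     # initialize ranking vars
--     rank = 1
--     skip_rank = 0   # counter for ties, used to determine following rank after a tie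
--
--     for i in range(len(sorted_list_of_streaks)):
--         if i == 0 or sorted_list_of_streaks[i]['daily_streak'] != sorted_list_of_streaks[i-1]['daily_streak']:
--             rank += skip_rank
--             skip_rank = 1
--         else:
--             skip_rank += 1
--
--         sorted_list_of_streaks[i]['rank'] = rank
--
--     return sorted_list_of_streaks
-- ===== SOURCE B (Python) =====
-- def generate_rank(list_of_streaks):
--     """Rank users by streak (competition ranking), grouping ties as runs."""
--     sorted_list = sorted(list_of_streaks, key=lambda x: x['daily_streak'], reverse=True)
--     ranked = []
--     count = 0
--     remaining = sorted_list
--     while remaining: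
--         streak = remaining[0]['daily_streak']
--         run = []
--         while remaining and remaining[0]['daily_streak'] == streak:
--             run.append(remaining.pop(0))
--         for d in run:
--             d['rank'] = count + 1
--         ranked.extend(run)
--         count += len(run)
--     return ranked
-- ===== Notes on version B (the rewrite author's own statement) =====
-- stated objective: alternative
-- what changed: B replaces A's per-index lookback with rank/skip_rank counters by an outer loop over runs of equal streaks, ranking each whole tie group count+1 from a running element count.
-- outside the precondition, e.g. on generate_rank([{'user_id': 1}]): A raises KeyError, B raises KeyError
import Mathlib
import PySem

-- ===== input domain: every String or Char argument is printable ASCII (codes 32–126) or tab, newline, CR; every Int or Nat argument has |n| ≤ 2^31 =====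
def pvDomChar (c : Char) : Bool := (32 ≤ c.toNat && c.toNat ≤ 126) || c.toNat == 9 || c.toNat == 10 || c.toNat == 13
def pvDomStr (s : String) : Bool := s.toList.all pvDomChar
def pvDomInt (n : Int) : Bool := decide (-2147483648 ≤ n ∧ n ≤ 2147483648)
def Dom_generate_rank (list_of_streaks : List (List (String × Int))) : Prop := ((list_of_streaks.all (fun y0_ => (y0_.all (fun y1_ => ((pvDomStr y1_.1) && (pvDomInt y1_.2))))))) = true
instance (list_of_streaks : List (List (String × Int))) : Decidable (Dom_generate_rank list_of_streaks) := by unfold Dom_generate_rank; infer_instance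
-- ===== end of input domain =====

-- B ranks tie groups as whole runs with a running element count, instead of A's per-index
-- lookback with a skip counter (objective: alternative decomposition, same cost).
-- Both Pythons mutate the input dicts in place; the equivalence proved here is about the return value.

-- ===== PORT A =====
-- x['daily_streak'] — exact under Pre_generate_rank (the key is present in every dict)
def pvStreakOf (d : List (String × Int)) : Int := (PySem.Dict.mk d).getD "daily_streak" 0
-- x['rank'] = r
def pvSetRank (d : List (String × Int)) (r : Int) : List (String × Int) :=
  ((PySem.Dict.mk d).insert "rank" r).items

-- A's for-loop over indices: prev = sorted[i-1]'s streak (none when i == 0), state (rank, skip_rank)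
def pvALoop : Option Int → Int → Int → List (List (String × Int)) → List (List (String × Int))
  | _, _, _, [] => []
  | prev, rank, skip, d :: rest =>
    let cur := pvStreakOf d
    if prev = none ∨ some cur ≠ prev then
      pvSetRank d (rank + skip) :: pvALoop (some cur) (rank + skip) 1 rest
    else
      pvSetRank d rank :: pvALoop (some cur) rank (skip + 1) rest

def generate_rank (list_of_streaks : List (List (String × Int))) : List (List (String × Int)) :=
  pvALoop none 1 0 (PySem.List.sorted list_of_streaks pvStreakOf true)

-- ===== PORT B =====
-- B's outer while: take the run of equal streaks at the head, rank it count+1, advance count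
def pvBLoop : Int → List (List (String × Int)) → List (List (String × Int))
  | _, [] => []
  | cnt, d :: rest =>
    let v := pvStreakOf d
    let run := d :: rest.takeWhile (fun x => pvStreakOf x == v)
    run.map (fun x => pvSetRank x (cnt + 1)) ++
      pvBLoop (cnt + run.length) (rest.dropWhile (fun x => pvStreakOf x == v))
  termination_by _ xs => xs.length
  decreasing_by
    simp only [List.length_cons]
    exact Nat.lt_succ_of_le (List.length_dropWhile_le _ _)

def generate_rank_alt (list_of_streaks : List (List (String × Int))) : List (List (String × Int)) :=
  pvBLoop 0 (PySem.List.sorted list_of_streaks pvStreakOf true)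

-- ===== PRECONDITION & SPEC =====
-- Pre_ excludes dicts missing the 'daily_streak' key, on which Python A raises KeyError in the sort key.
def Pre_generate_rank (list_of_streaks : List (List (String × Int))) : Prop :=
  ∀ d ∈ list_of_streaks, (PySem.Dict.mk d).contains "daily_streak" = true
instance (list_of_streaks : List (List (String × Int))) : Decidable (Pre_generate_rank list_of_streaks) := by
  unfold Pre_generate_rank; infer_instance

def pvWitness_generate_rank : (List (List (String × Int))) :=
  [[("user_id", 1), ("daily_streak", 3)], [("user_id", 2), ("daily_streak", 5)], [("daily_streak", 3)]]

def Spec_generate_rank (list_of_streaks : List (List (String × Int))) (out : List (List (String × Int))) : Prop := out = generate_rank_alt list_of_streaks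
instance (list_of_streaks : List (List (String × Int))) (out : List (List (String × Int))) : Decidable (Spec_generate_rank list_of_streaks out) := by unfold Spec_generate_rank; infer_instance

-- ===== CLAIM (what is proved, stated in full; the proofs are below) =====
def Claim_equal_generate_rank : Prop := ∀ (list_of_streaks : List (List (String × Int))), Dom_generate_rank list_of_streaks → Pre_generate_rank list_of_streaks → Spec_generate_rank list_of_streaks (generate_rank list_of_streaks)

-- ===== LEMMAS AND PROOFS =====

-- Within a tie group A keeps rank fixed and only grows skip.
theorem pvALoop_in (v : Int) (run : List (List (String × Int)))
    (h : ∀ d ∈ run, pvStreakOf d = v) :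
    ∀ (rest : List (List (String × Int))) (rank k : Int),
      pvALoop (some v) rank k (run ++ rest) =
        run.map (fun x => pvSetRank x rank) ++ pvALoop (some v) rank (k + run.length) rest := by
  induction run with
  | nil => intro rest rank k; simp
  | cons d run' ih =>
    intro rest rank k
    have hd : pvStreakOf d = v := h d (by simp)
    have h' : ∀ x ∈ run', pvStreakOf x = v := fun x hx => h x (by simp [hx])
    simp only [List.cons_append, pvALoop, hd]
    rw [if_neg (by simp)]
    rw [ih h' rest rank (k + 1)]
    simp only [List.map_cons, List.cons_append, List.length_cons]
    congr 3
    push_cast; ring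

theorem pvHead_dropWhile {α : Type} (p : α → Bool) :
    ∀ (l : List α) (x : α) (t : List α), l.dropWhile p = x :: t → p x = false := by
  intro l
  induction l with
  | nil => intro x t h; simp [List.dropWhile] at h
  | cons a l ih =>
    intro x t h
    by_cases hp : p a = true
    · rw [List.dropWhile_cons_of_pos hp] at h; exact ih x t h
    · rw [List.dropWhile_cons_of_neg hp] at h
      cases h; simpa using hp

theorem pvMain : ∀ (n : Nat) (xs : List (List (String × Int))), xs.length ≤ n →
    ∀ (cnt rank skip : Int) (p : Option Int),
      (∀ d t, xs = d :: t → p = none ∨ some (pvStreakOf d) ≠ p) →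
      rank + skip = cnt + 1 →
      pvALoop p rank skip xs = pvBLoop cnt xs := by
  intro n
  induction n with
  | zero =>
    intro xs hlen cnt rank skip p _ _
    have : xs = [] := List.length_eq_zero_iff.mp (Nat.le_zero.mp hlen)
    subst this; simp [pvALoop, pvBLoop]
  | succ m ih =>
    intro xs hlen cnt rank skip p hb hrs
    cases xs with
    | nil => simp [pvALoop, pvBLoop]
    | cons d rest =>
      have hbd := hb d rest rfl
      set v := pvStreakOf d with hv
      have hcond : p = none ∨ some v ≠ p := hbd
      rw [pvALoop, if_pos hcond]
      have hsplit : rest = rest.takeWhile (fun x => pvStreakOf x == v) ++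
          rest.dropWhile (fun x => pvStreakOf x == v) := (List.takeWhile_append_dropWhile).symm
      set tw := rest.takeWhile (fun x => pvStreakOf x == v) with htw
      set dw := rest.dropWhile (fun x => pvStreakOf x == v) with hdw
      have htwv : ∀ x ∈ tw, pvStreakOf x = v := by
        intro x hx
        have := List.mem_takeWhile_imp hx
        simpa using this
      have hstep : pvALoop (some v) (rank + skip) 1 rest =
          tw.map (fun x => pvSetRank x (rank + skip)) ++
            pvALoop (some v) (rank + skip) (1 + tw.length) dw := by
        conv_lhs => rw [hsplit]
        exact pvALoop_in v tw htwv dw (rank + skip) 1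
      have hdwlen : dw.length ≤ m := by
        have h1 : dw.length ≤ rest.length := List.length_dropWhile_le _ _
        have h2 : rest.length ≤ m := by simpa using Nat.lt_succ_iff.mp (Nat.lt_of_lt_of_le (by simp) hlen)
        omega
      have hrec : pvALoop (some v) (rank + skip) (1 + tw.length) dw =
          pvBLoop (cnt + (1 + tw.length)) dw := by
        apply ih dw hdwlen (cnt + (1 + tw.length)) (rank + skip) (1 + tw.length) (some v)
        · intro x t hx
          right
          have := pvHead_dropWhile (fun x => pvStreakOf x == v) rest x t (hdw ▸ hx)
          simp only [beq_eq_false_iff_ne, ne_eq] at this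
          simp [this]
        · omega
      rw [hstep, hrec, hrs]
      rw [pvBLoop]
      simp only [← hv, ← htw, ← hdw, List.map_cons, List.cons_append, List.length_cons]
      push_cast
      ring_nf

-- ===== VERDICT (by name: the statement is the Claim_ definition above) =====
theorem generate_rank_spec : Claim_equal_generate_rank := by
  intro l _ _
  unfold Spec_generate_rank generate_rank generate_rank_alt
  exact pvMain (PySem.List.sorted l pvStreakOf true).length _ le_rfl 0 1 0 none
    (fun _ _ _ => Or.inl rfl) (by ring)
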